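-- pv_equiv track=rewrite | github.com/AlexNhat/DataStorm_round1 | app/routers/os_api.py | _filter_pending
-- ===== SOURCE A (Python) =====
-- from typing import Any, Dict, List, Optional
--
-- def _filter_pending(actions: List[Dict[str, Any]], params: Dict[str, Optional[str]]) -> List[Dict[str, Any]]:
--     filtered = actions
--     if params.get("model_id"):
--         filtered = [a for a in filtered if a.get("source_strategy") == params["model_id"]]
--     if params.get("action_type"):
--         filtered = [a for a in filtered if a.get("type") == params["action_type"]]
--     if params.get("priority"):
--         filtered = [a for a in filtered if a.get("priority") == params["priority"]]
--     if params.get("status"):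
--         filtered = [a for a in filtered if a.get("status") == params["status"]]
--     return filtered
-- ===== SOURCE B (Python) =====
-- def _filter_pending(actions, params):
--     criteria = []
--     for key, field in (("model_id", "source_strategy"),
--                        ("action_type", "type"),
--                        ("priority", "priority"),
--                        ("status", "status")):
--         value = params.get(key)
--         if value:
--             criteria.append((field, value))
--     return [a for a in actions if all(a.get(f) == v for f, v in criteria)]
-- ===== Notes on version B (the rewrite author's own statement) =====
-- stated objective: alternative
-- what changed: B first assembles a (field, value) criteria table from the truthy params, then filters the actions in one pass with all(), instead of A's four successive conditional rescans of the list.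
import Mathlib
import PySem

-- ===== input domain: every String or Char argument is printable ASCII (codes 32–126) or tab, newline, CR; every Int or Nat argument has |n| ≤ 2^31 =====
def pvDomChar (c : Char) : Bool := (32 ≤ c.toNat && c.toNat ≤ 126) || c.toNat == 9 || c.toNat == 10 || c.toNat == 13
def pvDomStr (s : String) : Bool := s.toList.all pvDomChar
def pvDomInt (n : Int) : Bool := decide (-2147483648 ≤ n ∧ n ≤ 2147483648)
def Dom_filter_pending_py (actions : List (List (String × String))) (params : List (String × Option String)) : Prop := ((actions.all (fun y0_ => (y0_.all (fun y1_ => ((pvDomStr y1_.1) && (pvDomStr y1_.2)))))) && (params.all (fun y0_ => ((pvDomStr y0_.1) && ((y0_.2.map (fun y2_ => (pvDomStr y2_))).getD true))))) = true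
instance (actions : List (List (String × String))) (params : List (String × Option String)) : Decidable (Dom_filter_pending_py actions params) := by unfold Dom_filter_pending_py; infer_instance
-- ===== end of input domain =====

-- B assembles a (field, value) criteria table from the truthy params once, then filters the
-- actions in a single pass with an all-check, instead of A's four successive conditional
-- rescans of the list (objective: alternative decomposition, same cost).

-- ===== PORT A =====
-- Python truthiness of params.get(k): the key is present, its value is not None and not "".
def filter_pending_py (actions : List (List (String × String))) (params : List (String × Option String)) : List (List (String × String)) :=
  let p := PySem.Dict.mk params
  let filtered := actions
  let filtered :=
    match PySem.Dict.get? p "model_id" with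
    | some (some v) =>
        if v ≠ "" then filtered.filter (fun a => PySem.Dict.get? (PySem.Dict.mk a) "source_strategy" == some v) else filtered
    | _ => filtered
  let filtered :=
    match PySem.Dict.get? p "action_type" with
    | some (some v) =>
        if v ≠ "" then filtered.filter (fun a => PySem.Dict.get? (PySem.Dict.mk a) "type" == some v) else filtered
    | _ => filtered
  let filtered :=
    match PySem.Dict.get? p "priority" with
    | some (some v) =>
        if v ≠ "" then filtered.filter (fun a => PySem.Dict.get? (PySem.Dict.mk a) "priority" == some v) else filtered
    | _ => filtered
  let filtered :=
    match PySem.Dict.get? p "status" with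
    | some (some v) =>
        if v ≠ "" then filtered.filter (fun a => PySem.Dict.get? (PySem.Dict.mk a) "status" == some v) else filtered
    | _ => filtered
  filtered

-- ===== PORT B =====
-- one step of B's criteria-building loop: append (field, value) when params.get(key) is truthy
def pvCritStep (params : List (String × Option String)) (acc : List (String × String)) (kf : String × String) : List (String × String) :=
  -- value = params.get(key): None both when the key is absent and when it maps to None
  let value : Option String := (PySem.Dict.get? (PySem.Dict.mk params) kf.1).getD none
  match value with
  | some s => if s ≠ "" then acc ++ [(kf.2, s)] else acc
  | none => acc

def filter_pending_py_alt (actions : List (List (String × String))) (params : List (String × Option String)) : List (List (String × String)) :=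
  let criteria :=
    [("model_id", "source_strategy"), ("action_type", "type"),
     ("priority", "priority"), ("status", "status")].foldl (pvCritStep params) []
  actions.filter (fun a => criteria.all (fun fv => PySem.Dict.get? (PySem.Dict.mk a) fv.1 == some fv.2))

-- ===== PRECONDITION & SPEC =====
def Spec_filter_pending_py (actions : List (List (String × String))) (params : List (String × Option String)) (out : List (List (String × String))) : Prop := out = filter_pending_py_alt actions params
instance (actions : List (List (String × String))) (params : List (String × Option String)) (out : List (List (String × String))) : Decidable (Spec_filter_pending_py actions params out) := by unfold Spec_filter_pending_py; infer_instance

-- ===== CLAIM (what is proved, stated in full; the proofs are below) =====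
def Claim_equal_filter_pending_py : Prop := ∀ (actions : List (List (String × String))) (params : List (String × Option String)), Dom_filter_pending_py actions params → Spec_filter_pending_py actions params (filter_pending_py actions params)

-- ===== LEMMAS AND PROOFS =====

-- ===== VERDICT (by name: the statement is the Claim_ definition above) =====
set_option maxHeartbeats 2000000 in
theorem filter_pending_py_spec : Claim_equal_filter_pending_py := by
  intro actions params _
  unfold Spec_filter_pending_py filter_pending_py filter_pending_py_alt
  simp only [List.foldl, pvCritStep]
  rcases PySem.Dict.get? (PySem.Dict.mk params) "model_id" with _ | (_ | v1) <;>
  rcases PySem.Dict.get? (PySem.Dict.mk params) "action_type" with _ | (_ | v2) <;>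
  rcases PySem.Dict.get? (PySem.Dict.mk params) "priority" with _ | (_ | v3) <;>
  rcases PySem.Dict.get? (PySem.Dict.mk params) "status" with _ | (_ | v4) <;>
  dsimp only <;> (try split_ifs) <;>
  simp [List.filter_filter, *] <;> (refine List.filter_congr fun a _ => ?_) <;> ac_rfl
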